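-- pv_equiv track=rewrite | github.com/poshut/bwinf37-runde1 | a4-Schrebergärten/Implementierung/schrebergärten.py | anordnen
-- ===== SOURCE A (Python) =====
-- def laenge(r):
--     return r[0]
--
-- def breite(r):
--     return r[1]
--
-- def anordnen(sortiert, max_laenge):
--     ergebnis = []
--     current_row_height = breite(sortiert[0])
--     current_x = 0
--     current_y = 0
--
--     for r in sortiert:
--         if current_x + laenge(r) > max_laenge:
--             if current_x == 0:
--                 return None, None, None, None
--             current_x = 0
--             current_y += current_row_height
--             current_row_height = breite(r)
--
--         ergebnis.append((current_x, current_y, r))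
--         current_x += laenge(r)
--
--     return ergebnis, max_laenge, current_y + current_row_height, max_laenge * (current_y + current_row_height)
-- ===== SOURCE B (Python) =====
-- def anordnen(sortiert, max_laenge):
--     # Pass 1: split the rectangles into rows that fit within max_laenge.
--     rows = []
--     cur = []
--     x = 0
--     for r in sortiert:
--         if x + r[0] > max_laenge:
--             if x == 0:
--                 return None, None, None, None
--             rows.append(cur)
--             cur = [r]
--             x = r[0]
--         else:
--             cur.append(r)
--             x += r[0]
--     rows.append(cur)
--     # Pass 2: emit positions row by row; each row's height is its first rect's width.
--     positions = []
--     y = 0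
--     for row in rows:
--         h = row[0][1]
--         x = 0
--         for r in row:
--             positions.append((x, y, r))
--             x += r[0]
--         y += h
--     return positions, max_laenge, y, max_laenge * y
-- ===== Notes on version B (the rewrite author's own statement) =====
-- stated objective: alternative
-- what changed: Replaced A's single-pass state machine (positions, row height, x, y carried together) by a two-pass decomposition: first split the rectangles into rows fitting max_laenge, then emit positions and accumulate the total height row by row.
-- outside the precondition, e.g. on anordnen([], 5): A raises IndexError, B raises IndexError
import Mathlib
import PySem

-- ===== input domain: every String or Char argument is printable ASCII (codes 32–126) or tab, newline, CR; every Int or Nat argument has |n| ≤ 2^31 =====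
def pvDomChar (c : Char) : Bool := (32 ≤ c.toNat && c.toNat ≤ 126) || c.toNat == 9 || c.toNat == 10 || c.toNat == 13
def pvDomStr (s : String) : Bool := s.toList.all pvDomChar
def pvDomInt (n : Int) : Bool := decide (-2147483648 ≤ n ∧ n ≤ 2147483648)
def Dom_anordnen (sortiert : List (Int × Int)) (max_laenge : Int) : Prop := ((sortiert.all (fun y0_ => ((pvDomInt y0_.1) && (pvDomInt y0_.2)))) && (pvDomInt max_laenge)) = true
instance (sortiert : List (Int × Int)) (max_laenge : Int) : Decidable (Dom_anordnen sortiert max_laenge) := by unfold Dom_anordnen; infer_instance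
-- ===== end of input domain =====

-- B restructures A's single-pass position/height state machine into two passes (split into rows,
-- then emit positions); same return value on nonempty input, both raise IndexError on [] (objective: alternative).

-- ===== PORT A =====
-- the for-loop of A over the remaining rects, state (ergebnis, current_row_height, current_x, current_y);
-- none = the early `return None, None, None, None`
def anordnenGo (max_laenge : Int) : List (Int × Int) → List (Int × Int × (Int × Int)) → Int → Int → Int → Option (List (Int × Int × (Int × Int)) × Int)
  | [], erg, rh, _, y => some (erg, y + rh)
  | r :: rest, erg, rh, x, y =>
    if x + r.1 > max_laenge then
      if x = 0 then none
      else anordnenGo max_laenge rest (erg ++ [(0, y + rh, r)]) r.2 r.1 (y + rh)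
    else anordnenGo max_laenge rest (erg ++ [(x, y, r)]) rh (x + r.1) y

def anordnen (sortiert : List (Int × Int)) (max_laenge : Int) : (Option (List (Int × Int × (Int × Int)))) × Option Int × Option Int × Option Int :=
  match sortiert with
  | [] => (none, none, none, none)  -- Python raises IndexError here (sortiert[0]); excluded by Pre_
  | r0 :: _ =>
    match anordnenGo max_laenge sortiert [] r0.2 0 0 with
    | none => (none, none, none, none)
    | some p => (some p.1, some max_laenge, some p.2, some (max_laenge * p.2))

-- ===== PORT B =====
-- pass 1 of Source B: split into rows; state (cur, x); none = the early sentinel return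
def rowsGo (max_laenge : Int) : List (Int × Int) → List (Int × Int) → Int → Option (List (List (Int × Int)))
  | [], cur, _ => some [cur]
  | r :: rest, cur, x =>
    if x + r.1 > max_laenge then
      if x = 0 then none
      else (rowsGo max_laenge rest [r] r.1).map (cur :: ·)
    else rowsGo max_laenge rest (cur ++ [r]) (x + r.1)

-- inner loop of pass 2: positions of one row at height y, x accumulating
def emitGo (y : Int) : List (Int × Int) → Int → List (Int × Int × (Int × Int))
  | [], _ => []
  | r :: t, x => (x, y, r) :: emitGo y t (x + r.1)

-- outer loop of pass 2: rows to (positions, final y); row[0][1] ported as headD (rows are nonempty on Pre_)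
def emitRows : List (List (Int × Int)) → Int → List (Int × Int × (Int × Int)) × Int
  | [], y => ([], y)
  | row :: rest, y =>
    let p := emitRows rest (y + (row.headD (0, 0)).2)
    (emitGo y row 0 ++ p.1, p.2)

def anordnen_alt (sortiert : List (Int × Int)) (max_laenge : Int) : (Option (List (Int × Int × (Int × Int)))) × Option Int × Option Int × Option Int :=
  match rowsGo max_laenge sortiert [] 0 with
  | none => (none, none, none, none)
  | some rows =>
    let p := emitRows rows 0
    (some p.1, some max_laenge, some p.2, some (max_laenge * p.2))

-- ===== PRECONDITION & SPEC =====
-- Pre_ excludes only the empty list, on which A raises IndexError (sortiert[0]); B raises there too.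
def Pre_anordnen (sortiert : List (Int × Int)) (max_laenge : Int) : Prop := sortiert ≠ []
instance (sortiert : List (Int × Int)) (max_laenge : Int) : Decidable (Pre_anordnen sortiert max_laenge) := by unfold Pre_anordnen; infer_instance
def pvWitness_anordnen : (List (Int × Int)) × Int := ([(2, 1), (3, 2)], 4)

def Spec_anordnen (sortiert : List (Int × Int)) (max_laenge : Int) (out : (Option (List (Int × Int × (Int × Int)))) × Option Int × Option Int × Option Int) : Prop := out = anordnen_alt sortiert max_laenge
instance (sortiert : List (Int × Int)) (max_laenge : Int) (out : (Option (List (Int × Int × (Int × Int)))) × Option Int × Option Int × Option Int) : Decidable (Spec_anordnen sortiert max_laenge out) := by unfold Spec_anordnen; infer_instance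

-- ===== CLAIM (what is proved, stated in full; the proofs are below) =====
def Claim_equal_anordnen : Prop := ∀ (sortiert : List (Int × Int)) (max_laenge : Int), Dom_anordnen sortiert max_laenge → Pre_anordnen sortiert max_laenge → Spec_anordnen sortiert max_laenge (anordnen sortiert max_laenge)

-- ===== LEMMAS AND PROOFS =====

def sumLen : List (Int × Int) → Int
  | [] => 0
  | r :: t => r.1 + sumLen t

lemma sumLen_append (l : List (Int × Int)) (r : Int × Int) :
    sumLen (l ++ [r]) = sumLen l + r.1 := by
  induction l with
  | nil => simp [sumLen]
  | cons a t ih => simp [sumLen, ih]; ring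

lemma headD_append_left {α : Type} (l : List α) (r : α) (d : α) (h : l ≠ []) :
    (l ++ [r]).headD d = l.headD d := by
  cases l with
  | nil => exact absurd rfl h
  | cons a t => rfl

lemma rowsGo_prefix (m : Int) : ∀ (rs cur : List (Int × Int)) (x : Int) (rows : List (List (Int × Int))),
    rowsGo m rs cur x = some rows → ∃ t rest, rows = (cur ++ t) :: rest := by
  intro rs
  induction rs with
  | nil =>
    intro cur x rows h
    simp [rowsGo] at h
    exact ⟨[], [], by simp [← h]⟩
  | cons r rest ih =>
    intro cur x rows h
    simp only [rowsGo] at h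
    split_ifs at h with h1 h2
    · cases hrg : rowsGo m rest [r] r.1 with
      | none => rw [hrg] at h; simp at h
      | some rows' =>
        rw [hrg] at h
        simp only [Option.map_some, Option.some.injEq] at h
        exact ⟨[], rows', by simp [← h]⟩
    · rcases ih (cur ++ [r]) (x + r.1) rows h with ⟨t, rest', hr⟩
      exact ⟨[r] ++ t, rest', by simpa using hr⟩

lemma go_append (m : Int) : ∀ (rs : List (Int × Int)) (erg : List (Int × Int × (Int × Int))) (rh x y : Int),
    anordnenGo m rs erg rh x y = (anordnenGo m rs [] rh x y).map (fun p => (erg ++ p.1, p.2)) := by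
  intro rs
  induction rs with
  | nil => intro erg rh x y; simp [anordnenGo]
  | cons r rest ih =>
    intro erg rh x y
    simp only [anordnenGo]
    split_ifs with h1 h2
    · rfl
    · rw [ih (erg ++ [(0, y + rh, r)]), ih ([] ++ [(0, y + rh, r)])]
      cases anordnenGo m rest [] r.2 r.1 (y + rh) <;> simp
    · rw [ih (erg ++ [(x, y, r)]), ih ([] ++ [(x, y, r)])]
      cases anordnenGo m rest [] rh (x + r.1) y <;> simp

-- the rectangles of `rs` continuing a row started by `cur` at height y:
-- A's loop result equals B's rows split, emitted from offset cur.length / x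
lemma go_rows (m : Int) : ∀ (rs cur : List (Int × Int)) (x y : Int), cur ≠ [] → x = sumLen cur →
    anordnenGo m rs [] (cur.headD (0, 0)).2 x y =
      (rowsGo m rs cur x).map (fun rows =>
        match rows with
        | [] => ([], y)
        | row0 :: rest =>
          (emitGo y (row0.drop cur.length) x ++ (emitRows rest (y + (row0.headD (0, 0)).2)).1,
           (emitRows rest (y + (row0.headD (0, 0)).2)).2)) := by
  intro rs
  induction rs with
  | nil =>
    intro cur x y hc hx
    simp [anordnenGo, rowsGo, emitGo, emitRows]
  | cons r rest ih =>
    intro cur x y hc hx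
    simp only [anordnenGo, rowsGo]
    split_ifs with h1 h2
    · rfl
    · -- row break: new row [r] at height y + rh
      have H := ih [r] r.1 (y + (cur.headD (0, 0)).2) (by simp) (by simp [sumLen])
      simp only [List.headD_cons] at H
      rw [go_append, H]
      cases hrg : rowsGo m rest [r] r.1 with
      | none => simp
      | some rows' =>
        rcases rowsGo_prefix m rest [r] r.1 rows' hrg with ⟨t, rest', rfl⟩
        simp [emitRows, emitGo, List.headD]
    · -- r fits in the current row
      have H := ih (cur ++ [r]) (x + r.1) y (by simp) (by rw [sumLen_append, hx])
      rw [headD_append_left cur r (0, 0) hc] at H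
      rw [go_append, H]
      cases hrg : rowsGo m rest (cur ++ [r]) (x + r.1) with
      | none => simp
      | some rows' =>
        rcases rowsGo_prefix m rest (cur ++ [r]) (x + r.1) rows' hrg with ⟨t, rest', rfl⟩
        simp [emitGo, List.length_append]

-- ===== VERDICT (by name: the statement is the Claim_ definition above) =====
theorem anordnen_spec : Claim_equal_anordnen := by
  intro sortiert max_laenge _ hpre
  unfold Spec_anordnen
  cases sortiert with
  | nil => exact absurd rfl hpre
  | cons r0 rest =>
    unfold anordnen anordnen_alt
    simp only [anordnenGo, rowsGo]
    by_cases h1 : 0 + r0.1 > max_laenge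
    · rw [if_pos h1, if_pos h1]
      simp
    · rw [if_neg h1, if_neg h1]
      have H := go_rows max_laenge rest [r0] (0 + r0.1) 0 (by simp) (by simp [sumLen])
      simp only [List.headD_cons] at H
      rw [go_append, H]
      simp only [List.nil_append]
      cases hrg : rowsGo max_laenge rest [r0] (0 + r0.1) with
      | none => simp
      | some rows' =>
        rcases rowsGo_prefix max_laenge rest [r0] (0 + r0.1) rows' hrg with ⟨t, rest', rfl⟩
        simp [emitRows, emitGo, List.headD]
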